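-- pv_equiv track=rewrite | github.com/Hiddendoom45/StaticMangaReader | generate.py | genimglist
-- ===== SOURCE A (Python) =====
-- lpagetemplate = "<a href=\"$HREF$\"><img src=\"$SRC$\" id=\"$ID$\" style=\"width:100%; vertical-align:bottom\"></img></a>"
--
-- def genimglist(pages,nextchapter):
--     l = []
--     for i in range(len(pages)):
--         tlpagetemplate = lpagetemplate.replace("$SRC$",pages[i]['page'])
--         tlpagetemplate = tlpagetemplate.replace("$ID$",".".join(pages[i]['page'].split(".")[:-1]))
--
--         if i == len(pages)-1:
--             l.append(tlpagetemplate.replace("$HREF$",nextchapter))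
--         else:
--             l.append(tlpagetemplate.replace("$HREF$","#"+".".join(pages[i+1]['page'].split(".")[:-1])))
--     return l
-- ===== SOURCE B (Python) =====
-- lpagetemplate = "<a href=\"$HREF$\"><img src=\"$SRC$\" id=\"$ID$\" style=\"width:100%; vertical-align:bottom\"></img></a>"
--
-- def _ident(name):
--     return '.'.join(name.split('.')[:-1])
--
-- def _fill(src, href):
--     return (lpagetemplate.replace("$SRC$", src)
--             .replace("$ID$", _ident(src))
--             .replace("$HREF$", href))
--
-- def genimglist(pages, nextchapter):
--     # walk the pages back-to-front carrying the href each page should link to: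
--     # the last page links to nextchapter, every other page to '#'+id of its successor.
--     out = []
--     href = nextchapter
--     for p in reversed(pages):
--         src = p['page']
--         out.append(_fill(src, href))
--         href = '#' + _ident(src)
--     out.reverse()
--     return out
-- ===== Notes on version B (the rewrite author's own statement) =====
-- stated objective: alternative
-- what changed: Replaces A's forward index loop with an i+1 peek and a last-index branch by a backward traversal that carries the pending href as loop state (starting at nextchapter) and reverses the output, so no index arithmetic, lookahead or special last case exists.
import Mathlib
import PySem

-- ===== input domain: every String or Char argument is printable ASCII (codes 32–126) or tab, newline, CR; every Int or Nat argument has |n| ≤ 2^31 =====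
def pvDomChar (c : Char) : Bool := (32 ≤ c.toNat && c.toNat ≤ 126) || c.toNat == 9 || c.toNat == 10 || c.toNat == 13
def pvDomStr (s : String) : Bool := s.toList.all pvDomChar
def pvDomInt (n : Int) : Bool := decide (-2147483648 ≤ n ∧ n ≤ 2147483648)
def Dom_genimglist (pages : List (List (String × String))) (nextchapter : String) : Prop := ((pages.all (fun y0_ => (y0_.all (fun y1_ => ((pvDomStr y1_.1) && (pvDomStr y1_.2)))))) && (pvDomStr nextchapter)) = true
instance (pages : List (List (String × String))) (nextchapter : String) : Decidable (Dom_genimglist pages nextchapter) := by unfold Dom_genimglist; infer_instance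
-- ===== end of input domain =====

-- B walks the pages back-to-front carrying the pending href as loop state and reverses the
-- output, instead of A's forward index loop with an i+1 peek and a last-index branch
-- (objective: alternative; same cost).

def lpagetemplate : String := "<a href=\"$HREF$\"><img src=\"$SRC$\" id=\"$ID$\" style=\"width:100%; vertical-align:bottom\"></img></a>"

-- ===== PORT A =====
-- pages[i]['page'] : dict lookup = first match in the association list; the KeyError case
-- (no "page" key) is excluded by Pre_ and totalised with getD "".
def genimglist (pages : List (List (String × String))) (nextchapter : String) : List String :=
  (PySem.List.pyRange 0 (pages.length : Int) 1).foldl (fun l i =>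
    let page : String := ((PySem.List.pyGetD pages i []).lookup "page").getD ""
    let t1 := PySem.Str.replace lpagetemplate "$SRC$" page
    let t2 := PySem.Str.replace t1 "$ID$"
      (PySem.Str.join "." (PySem.List.slice ((PySem.Str.split? page ".").getD []) none (some (-1))))
    if i = (pages.length : Int) - 1 then
      l ++ [PySem.Str.replace t2 "$HREF$" nextchapter]
    else
      let nextpage : String := ((PySem.List.pyGetD pages (i + 1) []).lookup "page").getD ""
      l ++ [PySem.Str.replace t2 "$HREF$"
        ("#" ++ PySem.Str.join "." (PySem.List.slice ((PySem.Str.split? nextpage ".").getD []) none (some (-1))))]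
    ) []

-- ===== PORT B =====
-- helpers of Source B: _ident and _fill
def pvIdent (s : String) : String :=
  PySem.Str.join "." (PySem.List.slice ((PySem.Str.split? s ".").getD []) none (some (-1)))

def pvFill (src href : String) : String :=
  PySem.Str.replace (PySem.Str.replace (PySem.Str.replace lpagetemplate "$SRC$" src)
    "$ID$" (pvIdent src)) "$HREF$" href

-- the loop body of Source B: state = (out so far, pending href)
def pvStep (st : List String × String) (p : List (String × String)) : List String × String :=
  let src : String := ((p.lookup "page").getD "")
  (st.1 ++ [pvFill src st.2], "#" ++ pvIdent src)

def genimglist_alt (pages : List (List (String × String))) (nextchapter : String) : List String :=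
  let r := pages.reverse.foldl pvStep ([], nextchapter)
  r.1.reverse

-- ===== PRECONDITION & SPEC =====
-- Pre_ excludes exactly the inputs on which A raises KeyError: a page dict without a "page" key.
def Pre_genimglist (pages : List (List (String × String))) (nextchapter : String) : Prop :=
  ∀ p ∈ pages, (p.lookup "page").isSome
instance (pages : List (List (String × String))) (nextchapter : String) : Decidable (Pre_genimglist pages nextchapter) := by unfold Pre_genimglist; infer_instance

def pvWitness_genimglist : (List (List (String × String))) × String :=
  ([[("page", "a.png")], [("page", "b.png")]], "next.html")

def Spec_genimglist (pages : List (List (String × String))) (nextchapter : String) (out : List String) : Prop := out = genimglist_alt pages nextchapter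
instance (pages : List (List (String × String))) (nextchapter : String) (out : List String) : Decidable (Spec_genimglist pages nextchapter out) := by unfold Spec_genimglist; infer_instance

-- ===== CLAIM (what is proved, stated in full; the proofs are below) =====
def Claim_equal_genimglist : Prop := ∀ (pages : List (List (String × String))) (nextchapter : String), Dom_genimglist pages nextchapter → Pre_genimglist pages nextchapter → Spec_genimglist pages nextchapter (genimglist pages nextchapter)

-- ===== LEMMAS AND PROOFS =====

-- A's per-index element, for the map characterisation of port A
def pvSrcI (pages : List (List (String × String))) (i : Int) : String :=
  ((PySem.List.pyGetD pages i []).lookup "page").getD ""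

def pvElt (pages : List (List (String × String))) (nc : String) (i : Int) : String :=
  PySem.Str.replace (PySem.Str.replace (PySem.Str.replace lpagetemplate "$SRC$" (pvSrcI pages i))
    "$ID$" (pvIdent (pvSrcI pages i))) "$HREF$"
    (if i = (pages.length : Int) - 1 then nc
     else "#" ++ pvIdent (pvSrcI pages (i + 1)))

-- the href the predecessor of the first page of `ps` should use
def pvHrefOf (ps : List (List (String × String))) (nc : String) : String :=
  match ps with
  | [] => nc
  | h :: _ => "#" ++ pvIdent ((h.lookup "page").getD "")

lemma genimglist_eq_map (pages : List (List (String × String))) (nc : String) :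
    genimglist pages nc
      = (PySem.List.pyRange 0 (pages.length : Int) 1).map (pvElt pages nc) := by
  unfold genimglist
  rw [PySem.List.foldl_congr_mem _ _ (fun l i => l ++ [pvElt pages nc i]) [] ?h,
      PySem.List.foldl_append_singleton_eq_map, List.nil_append]
  case h =>
    intro acc i _
    simp only [pvElt, pvSrcI, pvIdent]
    split_ifs <;> rfl

lemma pvSrcI_shift (p : List (String × String)) (ps : List (List (String × String))) (k : Nat) :
    pvSrcI (p :: ps) ((k : Int) + 1) = pvSrcI ps k := by
  have e1 : ((k : Int) + 1) = ((k + 1 : Nat) : Int) := by push_cast; ring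
  rw [pvSrcI, pvSrcI, e1, PySem.List.pyGetD_natCast, PySem.List.pyGetD_natCast,
      List.getD_cons_succ]

lemma pvSrcI_zero (p : List (String × String)) (ps : List (List (String × String))) :
    pvSrcI (p :: ps) 0 = ((p.lookup "page").getD "") := by
  rw [pvSrcI, PySem.List.pyGetD_zero_cons]

lemma pvElt_shift (p : List (String × String)) (ps : List (List (String × String)))
    (nc : String) (k : Nat) :
    pvElt (p :: ps) nc ((k : Int) + 1) = pvElt ps nc k := by
  have e2 : ((k : Int) + 1 + 1) = (((k + 1 : Nat) : Int) + 1) := by push_cast; ring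
  rw [pvElt, pvElt, pvSrcI_shift, e2, pvSrcI_shift,
      show (((k + 1 : Nat)) : Int) = (k : Int) + 1 by push_cast; ring]
  by_cases hk : (k : Int) = (ps.length : Int) - 1
  · rw [if_pos hk,
        if_pos (show (k : Int) + 1 = (((p :: ps).length : Int)) - 1 by
          simp only [List.length_cons]; push_cast; omega)]
  · rw [if_neg hk,
        if_neg (show ¬((k : Int) + 1 = (((p :: ps).length : Int)) - 1) by
          simp only [List.length_cons]; push_cast; omega)]

lemma pvElt_zero (p : List (String × String)) (ps : List (List (String × String)))
    (nc : String) :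
    pvElt (p :: ps) nc 0 = pvFill ((p.lookup "page").getD "") (pvHrefOf ps nc) := by
  rw [pvElt, pvFill, pvSrcI_zero]
  cases ps with
  | nil =>
      rw [if_pos (by simp), pvHrefOf]
  | cons q t =>
      rw [if_neg (by simp only [List.length_cons]; push_cast; omega),
          show ((0 : Int) + 1) = ((0 : Nat) : Int) + 1 by norm_num,
          pvSrcI_shift, show ((0 : Nat) : Int) = (0 : Int) by norm_num,
          pvSrcI_zero, pvHrefOf]

-- port A satisfies the head recursion
lemma genimglist_nil (nc : String) : genimglist [] nc = [] := by
  simp [genimglist_eq_map, PySem.List.pyRange_one_eq_nil]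

lemma genimglist_cons (p : List (String × String)) (ps : List (List (String × String)))
    (nc : String) :
    genimglist (p :: ps) nc
      = pvFill ((p.lookup "page").getD "") (pvHrefOf ps nc) :: genimglist ps nc := by
  rw [genimglist_eq_map, genimglist_eq_map]
  have hlen : (0 : Int) < ((p :: ps).length : Int) := by simp only [List.length_cons]; push_cast; omega
  rw [PySem.List.pyRange_one_cons hlen, List.map_cons, pvElt_zero]
  refine congrArg (List.cons _) ?_
  rw [PySem.List.pyRange_one, PySem.List.pyRange_one,
      show ((((p :: ps).length : Int)) - (0 + 1)).toNat = ps.length by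
        simp only [List.length_cons]; push_cast; omega,
      show (((ps.length : Int)) - 0).toNat = ps.length by omega]
  simp only [List.map_map]
  apply List.map_congr_left
  intro k hk
  simp only [Function.comp]
  rw [show (0 : Int) + 1 + (k : Int) = (k : Int) + 1 by ring, pvElt_shift,
      show (0 : Int) + (k : Int) = (k : Int) by ring]

-- the pending-href state of B's fold is determined by the head of the unprocessed suffix
lemma alt_snd (ps : List (List (String × String))) (nc : String) :
    (ps.reverse.foldl pvStep ([], nc)).2 = pvHrefOf ps nc := by
  cases ps with
  | nil => rfl
  | cons q t =>
      rw [List.reverse_cons, List.foldl_append]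
      simp only [List.foldl_cons, List.foldl_nil]
      rfl

-- port B satisfies the same head recursion
lemma genimglist_alt_cons (p : List (String × String)) (ps : List (List (String × String)))
    (nc : String) :
    genimglist_alt (p :: ps) nc
      = pvFill ((p.lookup "page").getD "") (pvHrefOf ps nc) :: genimglist_alt ps nc := by
  unfold genimglist_alt
  rw [List.reverse_cons, List.foldl_append]
  simp only [List.foldl_cons, List.foldl_nil]
  rw [show (pvStep (ps.reverse.foldl pvStep ([], nc)) p).1
        = (ps.reverse.foldl pvStep ([], nc)).1
          ++ [pvFill ((p.lookup "page").getD "") ((ps.reverse.foldl pvStep ([], nc)).2)]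
      from rfl]
  rw [List.reverse_append, alt_snd]
  rfl

theorem genimglist_spec : Claim_equal_genimglist := by
  intro pages nc hdom hpre
  clear hdom hpre
  unfold Spec_genimglist
  induction pages with
  | nil => rw [genimglist_nil]; rfl
  | cons p ps ih => rw [genimglist_cons, genimglist_alt_cons, ih]
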